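-- pv_equiv track=rewrite | github.com/ciortanmadalina/complete_digest_exhaustive_search | bruteforce.py | cutpoints
-- ===== SOURCE A (Python) =====
-- def cutpoints(inputArray):
--     '''
--     Generates DNA positions from subsequence lengths.
--     For instance [1, 3, 3, 2]  produces [1, 4, 7]
--     This method omits the last element as it is not a cutpoint but the final
--     position of the string. If we don't do this operation, all cutpoints will include as
--     final element the length which is not a cutpoint.
--     :param inputArray:
--     :return: positions array
--     '''
--     positions = []
--     for i in range(len(inputArray) - 1):
--         if i == 0 :
--             positions.append(inputArray[0])
--         else:
--             #add previous element to current element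
--             positions.append(positions[-1] + inputArray[i])
--     return positions
-- ===== SOURCE B (Python) =====
-- def cutpoints(inputArray):
--     return [sum(inputArray[0:i + 1]) for i in range(len(inputArray) - 1)]
-- ===== Notes on version B (the rewrite author's own statement) =====
-- stated objective: simpler
-- what changed: Replaces the stateful loop that extends positions via its own last element with a one-line comprehension recomputing each cut point as the sum of the prefix slice inputArray[0:i+1].
import Mathlib
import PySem

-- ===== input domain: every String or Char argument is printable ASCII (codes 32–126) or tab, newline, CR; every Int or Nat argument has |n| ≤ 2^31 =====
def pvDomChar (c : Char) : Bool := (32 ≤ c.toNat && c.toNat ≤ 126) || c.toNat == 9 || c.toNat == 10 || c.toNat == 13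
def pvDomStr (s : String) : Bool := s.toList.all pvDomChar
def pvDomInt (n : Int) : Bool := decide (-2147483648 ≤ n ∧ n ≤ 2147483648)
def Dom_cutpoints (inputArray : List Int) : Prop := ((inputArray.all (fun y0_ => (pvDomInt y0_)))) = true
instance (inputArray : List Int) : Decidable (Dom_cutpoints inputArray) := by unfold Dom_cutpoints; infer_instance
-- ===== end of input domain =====

-- B replaces A's stateful running-total loop by a comprehension that recomputes each
-- cut point as the sum of the prefix slice inputArray[0:i+1]; equal return values, no speedup claimed.

-- ===== PORT A =====
-- positions[-1] and inputArray[i] are always in range when the loop reads them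
-- (i = 0 runs first), so the pyGetD default 0 is never the result in Python's executions.
def cutpoints (inputArray : List Int) : List Int :=
  (PySem.List.pyRange 0 ((inputArray.length : Int) - 1) 1).foldl
    (fun positions i =>
      if i = 0 then positions ++ [PySem.List.pyGetD inputArray 0 0]
      else positions ++ [PySem.List.pyGetD positions (-1) 0 + PySem.List.pyGetD inputArray i 0])
    []

-- ===== PORT B =====
def cutpoints_alt (inputArray : List Int) : List Int :=
  (PySem.List.pyRange 0 ((inputArray.length : Int) - 1) 1).map
    (fun i => (PySem.List.slice inputArray (some 0) (some (i + 1))).sum)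

-- ===== PRECONDITION & SPEC =====
def Spec_cutpoints (inputArray : List Int) (out : List Int) : Prop := out = cutpoints_alt inputArray
instance (inputArray : List Int) (out : List Int) : Decidable (Spec_cutpoints inputArray out) := by unfold Spec_cutpoints; infer_instance

-- ===== CLAIM (what is proved, stated in full; the proofs are below) =====
def Claim_equal_cutpoints : Prop := ∀ (inputArray : List Int), Dom_cutpoints inputArray → Spec_cutpoints inputArray (cutpoints inputArray)

-- ===== LEMMAS AND PROOFS =====

-- the loop body of port A, named for the proofs
def cutStep (xs : List Int) (positions : List Int) (i : Int) : List Int :=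
  if i = 0 then positions ++ [PySem.List.pyGetD xs 0 0]
  else positions ++ [PySem.List.pyGetD positions (-1) 0 + PySem.List.pyGetD xs i 0]

lemma take_sum_succ (xs : List Int) (n : Nat) (h : n < xs.length) :
    (xs.take (n + 1)).sum = (xs.take n).sum + xs[n] := by
  rw [List.take_add_one, List.sum_append]
  simp [List.getElem?_eq_getElem h]

lemma cut_invariant (xs : List Int) (n : Nat) (h : n ≤ xs.length) :
    (PySem.List.pyRange 0 (n : Int) 1).foldl (cutStep xs) []
      = (List.range n).map (fun k => (xs.take (k + 1)).sum) := by
  induction n with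
  | zero => simp
  | succ m ih =>
    have hm : m ≤ xs.length := Nat.le_of_succ_le h
    have hml : m < xs.length := h
    have hsplit : PySem.List.pyRange 0 ((m + 1 : Nat) : Int) 1
        = PySem.List.pyRange 0 (m : Int) 1 ++ [(m : Int)] := by
      push_cast
      exact PySem.List.pyRange_one_succ_right (by positivity)
    rw [hsplit, List.foldl_append, ih hm, List.range_succ, List.map_append]
    simp only [List.foldl_cons, List.foldl_nil, List.map_cons, List.map_nil]
    cases m with
    | zero =>
      -- first iteration: i = 0 branch appends inputArray[0]
      cases xs with
      | nil => simp at hml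
      | cons a t => simp [cutStep, List.take_add_one]
    | succ p =>
      -- later iterations: append positions[-1] + inputArray[i]
      have hne : (((p + 1 : Nat) : Int)) ≠ 0 := by positivity
      rw [cutStep, if_neg hne]
      congr 1
      have hlast : PySem.List.pyGetD
          ((List.range (p + 1)).map (fun k => (xs.take (k + 1)).sum)) (-1) 0
            = (xs.take (p + 1)).sum := by
        rw [List.range_succ, List.map_append]
        exact PySem.List.pyGetD_neg_one_append_singleton _ _ _
      rw [hlast, PySem.List.pyGetD_natCast, List.getD_eq_getElem _ _ hml,
        take_sum_succ xs (p + 1) hml]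

lemma cutpoints_eq_alt (xs : List Int) : cutpoints xs = cutpoints_alt xs := by
  cases xs with
  | nil => decide
  | cons a t =>
    have hlen : ((a :: t).length : Int) - 1 = ((t.length : Nat) : Int) := by
      simp
    unfold cutpoints cutpoints_alt
    rw [hlen]
    show (PySem.List.pyRange 0 ((t.length : Nat) : Int) 1).foldl (cutStep (a :: t)) [] = _
    rw [cut_invariant (a :: t) t.length (by simp),
      PySem.List.pyRange_one, Int.sub_zero, Int.toNat_natCast, List.map_map]
    refine List.map_congr_left ?_
    intro k _
    have : PySem.List.slice (a :: t) (some 0) (some ((0 : Int) + (k : Int) + 1))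
        = (a :: t).take (k + 1) := by
      have : ((0 : Int) + (k : Int) + 1) = (((k + 1 : Nat)) : Int) := by push_cast; ring
      rw [this, PySem.List.slice_zero_start, PySem.List.slice_to_natCast]
    simp only [Function.comp, this]

-- ===== VERDICT (by name: the statement is the Claim_ definition above) =====
theorem cutpoints_spec : Claim_equal_cutpoints := by
  intro xs _
  unfold Spec_cutpoints
  exact cutpoints_eq_alt xs
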